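-- pv_equiv track=rewrite | github.com/1st-award/codetree-TILs | 240110/등차수열/arithmetic-sequence.py | solution
-- ===== SOURCE A (Python) =====
-- def solution(N, numbers):
--     numbers.sort()
--     max_count = 0
--     sequence_k_list = []
--     for i in range(N):
--         for j in range(i + 1, N):
--             for k in range(numbers[i] + 1, numbers[j]):
--                 if abs(numbers[i] - k) == abs(k - numbers[j]):
--                     sequence_k_list.append(k)
--     for n in list(set(sequence_k_list)):
--         max_count = max(max_count, sequence_k_list.count(n))
--     return max_count
-- ===== SOURCE B (Python) =====
-- def solution(N, numbers):
--     numbers.sort()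
--     xs = numbers[:max(N, 0)]
--     mid = {}
--     for i in range(len(xs)):
--         a = xs[i]
--         for b in xs[i + 1:]:
--             if a < b and (a + b) % 2 == 0:
--                 m = (a + b) // 2
--                 mid[m] = mid.get(m, 0) + 1
--     best = 0
--     for c in mid.values():
--         if c > best:
--             best = c
--     return best
-- ===== Notes on version B (the rewrite author's own statement) =====
-- stated objective: faster
-- what changed: Instead of scanning every integer strictly between each pair and then recounting the collected list with repeated list.count, B computes each pair's midpoint in closed form (when the sum is even) and tallies it in a dict built once, returning the max tally.
import Mathlib
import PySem

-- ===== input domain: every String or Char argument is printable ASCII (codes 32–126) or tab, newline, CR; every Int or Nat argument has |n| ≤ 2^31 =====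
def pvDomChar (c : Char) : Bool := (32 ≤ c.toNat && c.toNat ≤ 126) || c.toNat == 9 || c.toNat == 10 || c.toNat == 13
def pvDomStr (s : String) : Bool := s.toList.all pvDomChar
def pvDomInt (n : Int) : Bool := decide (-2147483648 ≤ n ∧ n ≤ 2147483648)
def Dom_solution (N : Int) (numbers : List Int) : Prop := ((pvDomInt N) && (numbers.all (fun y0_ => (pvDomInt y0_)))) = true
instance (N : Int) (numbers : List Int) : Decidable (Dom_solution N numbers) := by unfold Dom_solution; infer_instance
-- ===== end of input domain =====

-- B replaces A's scan of every integer between each pair (and its repeated list.count pass)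
-- by the closed-form midpoint of each pair tallied once into a dict; both A and B sort the
-- list argument in place (same side effect), the equivalence proved is about the return value.

-- ===== PORT A =====
def solution (N : Int) (numbers : List Int) : Int :=
  let nums := PySem.List.sorted numbers (fun x => x) false
  let klist : List Int :=
    (PySem.List.pyRange 0 N 1).foldl (fun acc i =>
      (PySem.List.pyRange (i + 1) N 1).foldl (fun acc j =>
        (PySem.List.pyRange (PySem.List.pyGetD nums i 0 + 1) (PySem.List.pyGetD nums j 0) 1).foldl
          (fun acc k =>
            if |PySem.List.pyGetD nums i 0 - k| = |k - PySem.List.pyGetD nums j 0| then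
              acc ++ [k]
            else acc)
          acc) acc) []
  (PySem.Set.ofList klist).foldl
    (fun max_count n => max max_count ((PySem.List.count klist n : Nat) : Int)) 0

-- ===== PORT B =====
def solution_alt (N : Int) (numbers : List Int) : Int :=
  let nums := PySem.List.sorted numbers (fun x => x) false
  let xs := PySem.List.slice nums none (some (max N 0))
  let mid : PySem.Dict Int Int :=
    (PySem.List.pyRange 0 (xs.length : Int) 1).foldl (fun d i =>
      let a := PySem.List.pyGetD xs i 0
      (PySem.List.slice xs (some (i + 1)) none).foldl (fun d b =>
        if a < b ∧ PySem.Int.mod (a + b) 2 = 0 then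
          let m := PySem.Int.floordiv (a + b) 2
          d.insert m (d.getD m 0 + 1)
        else d) d) PySem.Dict.empty
  mid.values.foldl (fun best c => if best < c then c else best) 0

-- ===== PRECONDITION & SPEC =====
-- A raises IndexError exactly when it indexes past the list, i.e. when 2 ≤ N and N > len(numbers).
def Pre_solution (N : Int) (numbers : List Int) : Prop := 2 ≤ N → N ≤ (numbers.length : Int)
instance (N : Int) (numbers : List Int) : Decidable (Pre_solution N numbers) := by unfold Pre_solution; infer_instance
def pvWitness_solution : Int × List Int := (3, [1, 5, 3])

def Spec_solution (N : Int) (numbers : List Int) (out : Int) : Prop := out = solution_alt N numbers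
instance (N : Int) (numbers : List Int) (out : Int) : Decidable (Spec_solution N numbers out) := by unfold Spec_solution; infer_instance

-- ===== CLAIM (what is proved, stated in full; the proofs are below) =====
def Claim_equal_solution : Prop := ∀ (N : Int) (numbers : List Int), Dom_solution N numbers → Pre_solution N numbers → Spec_solution N numbers (solution N numbers)

-- ===== LEMMAS AND PROOFS =====

-- the midpoints a pair (a, b) contributes (B's closed form)
def pvMids (a b : Int) : List Int :=
  if a < b ∧ PySem.Int.mod (a + b) 2 = 0 then [PySem.Int.floordiv (a + b) 2] else []

theorem pvMod_two (x : Int) : PySem.Int.mod x 2 = x % 2 := by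
  unfold PySem.Int.mod
  rw [Int.fmod_eq_emod, if_pos (Or.inl (by norm_num))]
  ring

theorem pvFdiv_two (x : Int) : PySem.Int.floordiv x 2 = x / 2 := by
  unfold PySem.Int.floordiv
  rw [Int.fdiv_eq_ediv, if_pos (Or.inl (by norm_num))]
  ring

-- A's innermost loop over range(a+1, b) collects exactly pvMids a b
theorem pvKfold (a b : Int) (acc : List Int) :
    (PySem.List.pyRange (a + 1) b 1).foldl
      (fun acc k => if |a - k| = |k - b| then acc ++ [k] else acc) acc
    = acc ++ pvMids a b := by
  rw [PySem.List.foldl_append_ite_eq_filter]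
  congr 1
  unfold pvMids
  by_cases h : a < b ∧ PySem.Int.mod (a + b) 2 = 0
  · rw [if_pos h]
    obtain ⟨hab, hm⟩ := h
    rw [pvMod_two] at hm
    rw [pvFdiv_two]
    set m := (a + b) / 2 with hmdef
    have h2m : 2 * m = a + b := by omega
    have habs : ∀ k ∈ PySem.List.pyRange (a + 1) b 1,
        (decide (|a - k| = |k - b|)) = (k == m) := by
      intro k hk
      rw [PySem.List.mem_pyRange_one] at hk
      have h1 : |a - k| = k - a := by rw [abs_of_nonpos (by omega)]; ring
      have h2 : |k - b| = b - k := by rw [abs_of_nonpos (by omega)]; ring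
      apply Bool.eq_iff_iff.mpr
      simp only [decide_eq_true_eq, beq_iff_eq, h1, h2]
      omega
    rw [List.filter_congr habs, List.filter_beq,
        List.count_eq_one_of_mem (PySem.List.nodup_pyRange_one _ _)
          (by rw [PySem.List.mem_pyRange_one]; omega),
        List.replicate_one]
  · rw [if_neg h]
    rw [List.filter_eq_nil_iff]
    intro k hk
    rw [PySem.List.mem_pyRange_one] at hk
    have h1 : |a - k| = k - a := by rw [abs_of_nonpos (by omega)]; ring
    have h2 : |k - b| = b - k := by rw [abs_of_nonpos (by omega)]; ring
    simp only [h1, h2, decide_eq_true_eq]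
    intro he
    rw [pvMod_two] at h
    exact h ⟨by omega, by omega⟩

-- a nested fold of folds is the fold of the flatMap
theorem pvFoldl_flatMap {α β γ : Type} (g : α → List β) (f : γ → β → γ)
    (l : List α) (init : γ) :
    l.foldl (fun acc x => (g x).foldl f acc) init = (l.flatMap g).foldl f init := by
  induction l generalizing init with
  | nil => rfl
  | cons x t ih => simp only [List.foldl_cons, List.flatMap_cons, List.foldl_append, ih]

-- congruence for flatMap
theorem pvFlatMap_congr {α β : Type} (l : List α) (g g' : α → List β)
    (h : ∀ x ∈ l, g x = g' x) : l.flatMap g = l.flatMap g' := by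
  induction l with
  | nil => rfl
  | cons x t ih =>
    simp only [List.flatMap_cons]
    rw [h x (List.mem_cons_self), ih (fun y hy => h y (List.mem_cons_of_mem _ hy))]

-- A's collected list, as a flatMap of midpoints over index pairs
theorem pvAList (s : List Int) (N : Int) :
    ((PySem.List.pyRange 0 N 1).foldl (fun acc i =>
      (PySem.List.pyRange (i + 1) N 1).foldl (fun acc j =>
        (PySem.List.pyRange (PySem.List.pyGetD s i 0 + 1) (PySem.List.pyGetD s j 0) 1).foldl
          (fun acc k =>
            if |PySem.List.pyGetD s i 0 - k| = |k - PySem.List.pyGetD s j 0| then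
              acc ++ [k]
            else acc)
          acc) acc) ([] : List Int))
    = (PySem.List.pyRange 0 N 1).flatMap (fun i =>
        (PySem.List.pyRange (i + 1) N 1).flatMap (fun j =>
          pvMids (PySem.List.pyGetD s i 0) (PySem.List.pyGetD s j 0))) := by
  simp only [pvKfold, PySem.List.foldl_append_eq_flatMap, List.nil_append]

-- B's dict is the counter of the flatMap of midpoints
theorem pvBDict (xs : List Int) :
    ((PySem.List.pyRange 0 (xs.length : Int) 1).foldl (fun d i =>
      let a := PySem.List.pyGetD xs i 0
      (PySem.List.slice xs (some (i + 1)) none).foldl (fun d b =>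
        if a < b ∧ PySem.Int.mod (a + b) 2 = 0 then
          let m := PySem.Int.floordiv (a + b) 2
          d.insert m (d.getD m 0 + 1)
        else d) d) PySem.Dict.empty)
    = PySem.Dict.counter
        ((PySem.List.pyRange 0 (xs.length : Int) 1).flatMap (fun i =>
          (PySem.List.slice xs (some (i + 1)) none).flatMap (fun b =>
            pvMids (PySem.List.pyGetD xs i 0) b))) := by
  rw [← PySem.Dict.foldl_insert_getD_add_one_eq_counter, ← pvFoldl_flatMap]
  apply PySem.List.foldl_congr_mem
  intro d i _
  rw [← pvFoldl_flatMap]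
  apply PySem.List.foldl_congr_mem
  intro d b _
  unfold pvMids
  by_cases h : PySem.List.pyGetD xs i 0 < b ∧
      PySem.Int.mod (PySem.List.pyGetD xs i 0 + b) 2 = 0
  · rw [if_pos h, if_pos h]; rfl
  · rw [if_neg h, if_neg h]; rfl

-- max over a counter's values is A's max-over-set-of-counts loop
theorem pvMaxFold (L : List Int) :
    (PySem.Dict.counter L).values.foldl (fun best c => if best < c then c else best) 0
    = (PySem.Set.ofList L).foldl
        (fun max_count n => max max_count ((PySem.List.count L n : Nat) : Int)) 0 := by
  rw [PySem.Dict.values_eq_map_keys _ (PySem.Dict.nodup_keys_counter L) 0]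
  rw [List.foldl_map]
  simp only [PySem.Dict.getD_counter, PySem.Dict.keys_counter]
  apply PySem.List.foldl_congr_mem
  intro acc x _
  have : PySem.List.count L x = List.count x L := rfl
  rw [this]
  split_ifs with h <;> omega

-- pyGetD commutes with take inside the kept range
theorem pvGetD_take (s : List Int) (n : Nat) (j : Int) (h0 : 0 ≤ j) (h1 : j < (n : Int))
    (h2 : j < (s.length : Int)) :
    PySem.List.pyGetD (s.take n) j 0 = PySem.List.pyGetD s j 0 := by
  rw [PySem.List.pyGetD_eq_getElem _ _ h0 (by simp [List.length_take]; omega),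
      PySem.List.pyGetD_eq_getElem _ _ h0 h2, List.getElem_take]

-- the main case: 0 < N ≤ len numbers
theorem pvMain (N : Int) (numbers : List Int) (hN : 0 < N)
    (hlen : N ≤ (numbers.length : Int)) : solution N numbers = solution_alt N numbers := by
  simp only [solution, solution_alt]
  set s := PySem.List.sorted numbers (fun x => x) false with hs
  have hslen : s.length = numbers.length := PySem.List.length_sorted _ _ _
  have hmax : max N 0 = N := by omega
  rw [hmax]
  rw [PySem.List.slice_to _ (by omega : (0:Int) ≤ N)]
  set xs := s.take N.toNat with hxs
  have hxslen : xs.length = N.toNat := by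
    rw [hxs, List.length_take]; omega
  have hxslenI : ((xs.length : Nat) : Int) = N := by rw [hxslen]; omega
  rw [pvAList, pvBDict, pvMaxFold, hxslenI]
  have hL : (PySem.List.pyRange 0 N 1).flatMap (fun i =>
        (PySem.List.slice xs (some (i + 1)) none).flatMap (fun b =>
          pvMids (PySem.List.pyGetD xs i 0) b))
      = (PySem.List.pyRange 0 N 1).flatMap (fun i =>
        (PySem.List.pyRange (i + 1) N 1).flatMap (fun j =>
          pvMids (PySem.List.pyGetD s i 0) (PySem.List.pyGetD s j 0))) := by
    apply pvFlatMap_congr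
    intro i hi
    rw [PySem.List.mem_pyRange_one] at hi
    have hgi : PySem.List.pyGetD xs i 0 = PySem.List.pyGetD s i 0 :=
      pvGetD_take s N.toNat i hi.1 (by omega) (by omega)
    rw [PySem.List.slice_from _ (by omega : (0:Int) ≤ i + 1)]
    have hdrop : xs.drop (i+1).toNat
        = (PySem.List.pyRange (i+1) ((xs.length : Nat) : Int) 1).map
            (fun j => PySem.List.pyGetD xs j 0) := by
      rw [PySem.List.map_pyGetD_pyRange' xs 0 (by omega : (0:Int) ≤ i + 1)]
    rw [hdrop, hxslenI, List.flatMap_map]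
    apply pvFlatMap_congr
    intro j hj
    rw [PySem.List.mem_pyRange_one] at hj
    have hgj : PySem.List.pyGetD xs j 0 = PySem.List.pyGetD s j 0 :=
      pvGetD_take s N.toNat j (by omega) (by omega) (by omega)
    rw [hgi, hgj]
  rw [hL]

theorem pvAux (N : Int) (numbers : List Int)
    (hpre : Pre_solution N numbers) : solution N numbers = solution_alt N numbers := by
  by_cases hN : N ≤ 0
  · -- N ≤ 0 : both sides are 0
    simp only [solution, solution_alt]
    rw [PySem.List.pyRange_one_eq_nil hN]
    have hmax : max N 0 = 0 := by omega
    rw [hmax]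
    rw [PySem.List.slice_to _ le_rfl]
    simp
    rfl
  · by_cases hle : N ≤ ((numbers.length : Int))
    · exact pvMain N numbers (by omega) hle
    · -- then N = 1 and numbers = [] (Pre_ forces N < 2)
      have h1 : N = 1 := by
        unfold Pre_solution at hpre
        by_cases h2 : 2 ≤ N
        · exact absurd (hpre h2) hle
        · omega
      subst h1
      have h0 : numbers = [] := by
        cases numbers with
        | nil => rfl
        | cons a t =>
          exfalso; apply hle; simp only [List.length_cons]; push_cast; omega
      subst h0
      decide

-- ===== VERDICT (by name: the statement is the Claim_ definition above) =====
theorem solution_spec : Claim_equal_solution := by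
  intro N numbers _ hpre
  unfold Spec_solution
  exact pvAux N numbers hpre
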